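-- pv_equiv track=rewrite | github.com/kh277/BOJ | 백준/Bronze/26040. 특정 대문자를 소문자로 바꾸기/특정 대문자를 소문자로 바꾸기.py | solve
-- ===== SOURCE A (Python) =====
-- def solve(A, B):
--     result = []
--     for i in A:
--         if i in B:
--             result.append(chr(ord(i)+32))
--         else:
--             result.append(i)
--
--     return ''.join(result)
-- ===== SOURCE B (Python) =====
-- def solve(A, B):
--     # Staged whole-string passes: replace each distinct char of B in one
--     # string-wide replace.  Descending code-point order guarantees a char
--     # produced by a replacement (c+32, larger than c) is never re-replaced
--     # by a later (smaller) char of B.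
--     for c in sorted(set(B), reverse=True):
--         A = A.replace(c, chr(ord(c) + 32))
--     return A
-- ===== Notes on version B (the rewrite author's own statement) =====
-- stated objective: faster
-- what changed: Instead of one pass over A testing each char's membership in B, B performs staged whole-string replace passes, one per distinct char of B, in descending code-point order (so a replacement's output c+32, being larger, is never re-replaced by a later smaller char); the per-char Python loop disappears into C-level str.replace passes.
import Mathlib
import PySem

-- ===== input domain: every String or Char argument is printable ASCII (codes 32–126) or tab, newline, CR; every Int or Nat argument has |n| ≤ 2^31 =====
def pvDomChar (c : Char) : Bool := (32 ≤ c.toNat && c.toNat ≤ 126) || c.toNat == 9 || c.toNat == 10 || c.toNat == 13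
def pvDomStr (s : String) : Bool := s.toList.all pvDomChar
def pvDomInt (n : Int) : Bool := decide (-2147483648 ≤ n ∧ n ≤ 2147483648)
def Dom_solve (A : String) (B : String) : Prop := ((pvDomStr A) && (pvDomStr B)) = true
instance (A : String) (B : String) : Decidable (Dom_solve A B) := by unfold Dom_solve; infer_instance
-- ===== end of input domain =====

-- B replaces A's single pass with per-char membership test by staged whole-string
-- replace passes over the distinct chars of B in descending code-point order (same result).

-- ===== PORT A =====
-- result = []; for i in A: append chr(ord(i)+32) if i in B else i; ''.join(result)
def solve (A : String) (B : String) : String :=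
  String.ofList (A.toList.foldl
    (fun result i =>
      if B.toList.contains i then result ++ [Char.ofNat (i.toNat + 32)]
      else result ++ [i])
    [])

-- ===== PORT B =====
-- for c in sorted(set(B), reverse=True): A = A.replace(c, chr(ord(c)+32)); return A
def solve_alt (A : String) (B : String) : String :=
  (PySem.List.sorted (PySem.Set.ofList B.toList) (fun c => c) true).foldl
    (fun s c => PySem.Str.replace s (String.ofList [c]) (String.ofList [Char.ofNat (c.toNat + 32)]))
    A

-- ===== PRECONDITION & SPEC =====
def Spec_solve (A : String) (B : String) (out : String) : Prop := out = solve_alt A B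
instance (A : String) (B : String) (out : String) : Decidable (Spec_solve A B out) := by unfold Spec_solve; infer_instance

-- ===== CLAIM (what is proved, stated in full; the proofs are below) =====
def Claim_equal_solve : Prop := ∀ (A : String) (B : String), Dom_solve A B → Spec_solve A B (solve A B)

-- ===== LEMMAS AND PROOFS =====

-- A's loop builds acc ++ map
lemma solve_loop_eq_map (l : List Char) (Bl : List Char) (acc : List Char) :
    l.foldl
      (fun result i =>
        if Bl.contains i then result ++ [Char.ofNat (i.toNat + 32)]
        else result ++ [i]) acc
      = acc ++ l.map (fun i => if Bl.contains i then Char.ofNat (i.toNat + 32) else i) := by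
  induction l generalizing acc with
  | nil => simp
  | cons a l ih =>
    simp only [List.foldl_cons, List.map_cons, ih]
    by_cases h : a ∈ Bl <;> simp [h]

-- Chars.replace.go on a single-char pattern is a pointwise map (enough fuel)
lemma replace_go_single (o n : Char) (l acc : List Char) (fuel : Nat) (h : l.length ≤ fuel) :
    PySem.Chars.replace.go [o] [n] fuel l acc
      = acc.reverse ++ l.map (fun c => if c = o then n else c) := by
  induction l generalizing fuel acc with
  | nil => cases fuel <;> rw [PySem.Chars.replace.go] <;> simp
  | cons c t ih =>
    cases fuel with
    | zero => simp at h
    | succ fuel =>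
      rw [PySem.Chars.replace.go]
      simp only [List.isPrefixOf, Bool.and_true]
      by_cases hc : c = o
      · subst hc
        simp only [beq_self_eq_true, List.length_cons, List.length_nil,
          List.drop_succ_cons, List.drop_zero, if_pos]
        rw [ih _ _ (Nat.le_of_succ_le_succ h)]
        simp
      · have : (o == c) = false := by simp [Ne.symm hc]
        simp only [this, Bool.false_eq_true, if_neg, not_false_iff]
        rw [ih _ _ (Nat.le_of_succ_le_succ h)]
        simp [hc]

-- single-char str.replace = map
lemma replace_single (s : List Char) (o n : Char) :
    PySem.Chars.replace s [o] [n] = s.map (fun c => if c = o then n else c) := by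
  unfold PySem.Chars.replace
  simp only [List.isEmpty_cons, Bool.false_eq_true, if_neg, not_false_iff]
  rw [replace_go_single o n s [] s.length (le_refl _)]
  simp

-- descending staged replaces compute the simultaneous map
lemma stages (cs : List Char) (s : List Char)
    (hdesc : cs.Pairwise (fun a b => b < a))
    (hb : ∀ c ∈ cs, c.toNat + 32 < 55296) :
    cs.foldl (fun t c => t.map (fun ch => if ch = c then Char.ofNat (c.toNat + 32) else ch)) s
      = s.map (fun ch => if ch ∈ cs then Char.ofNat (ch.toNat + 32) else ch) := by
  induction cs generalizing s with
  | nil => simp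
  | cons c rest ih =>
    have hpw := (List.pairwise_cons.mp hdesc)
    simp only [List.foldl_cons]
    rw [ih _ hpw.2 (fun x hx => hb x (List.mem_cons_of_mem _ hx))]
    rw [List.map_map]
    apply List.map_congr_left
    intro ch _
    simp only [Function.comp_apply]
    by_cases hch : ch = c
    · subst hch
      simp only [if_true, eq_self_iff_true]
      have hval : (Char.ofNat (ch.toNat + 32)).toNat = ch.toNat + 32 := by
        rw [Char.toNat_ofNat]
        have := hb ch (List.mem_cons_self)
        simp [Nat.isValidChar, this]
      have hnm : Char.ofNat (ch.toNat + 32) ∉ rest := by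
        intro hmem
        have hlt : Char.ofNat (ch.toNat + 32) < ch := hpw.1 _ hmem
        have : (Char.ofNat (ch.toNat + 32)).toNat < ch.toNat := Nat.lt_of_succ_le hlt
        omega
      simp [hnm]
    · simp only [if_neg hch, List.mem_cons]
      by_cases hr : ch ∈ rest
      · simp [hr]
      · simp [hr, hch]

-- B's String-level fold projected to lists of chars
lemma foldl_replace_toList (cs : List Char) (s : String) :
    ((cs.foldl
        (fun s c => PySem.Str.replace s (String.ofList [c]) (String.ofList [Char.ofNat (c.toNat + 32)]))
        s)).toList
      = cs.foldl (fun t c => PySem.Chars.replace t [c] [Char.ofNat (c.toNat + 32)]) s.toList := by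
  induction cs generalizing s with
  | nil => rfl
  | cons c rest ih =>
    simp only [List.foldl_cons, ih, PySem.Str.toList_replace, String.toList_ofList]

-- the sorted distinct chars of B are strictly descending
lemma sorted_set_desc (Bl : List Char) :
    (PySem.List.sorted (PySem.Set.ofList Bl) (fun c => c) true).Pairwise (fun a b => b < a) := by
  have hle := PySem.List.sorted_pairwise_rev (PySem.Set.ofList Bl) (fun c => c)
  have hnd : (PySem.List.sorted (PySem.Set.ofList Bl) (fun c => c) true).Nodup :=
    (PySem.List.sorted_perm (PySem.Set.ofList Bl) (fun c => c) true).symm.nodup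
      (PySem.Set.nodup_ofList Bl)
  exact (hle.and hnd).imp (fun h => lt_of_le_of_ne h.1 (fun he => h.2 he.symm))

-- ===== VERDICT (by name: the statement is the Claim_ definition above) =====
theorem solve_spec : Claim_equal_solve := by
  intro A B hdom
  unfold Spec_solve solve solve_alt
  have hB : ∀ c ∈ (PySem.List.sorted (PySem.Set.ofList B.toList) (fun c => c) true),
      c.toNat + 32 < 55296 := by
    intro c hc
    rw [PySem.List.mem_sorted, PySem.Set.mem_ofList] at hc
    unfold Dom_solve pvDomStr at hdom
    rw [Bool.and_eq_true] at hdom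
    have := (List.all_eq_true.mp hdom.2) c hc
    unfold pvDomChar at this
    simp only [Bool.or_eq_true, Bool.and_eq_true, decide_eq_true_eq, beq_iff_eq] at this
    omega
  apply String.toList_injective
  rw [String.toList_ofList, foldl_replace_toList]
  have hfn : (fun (t : List Char) (c : Char) => PySem.Chars.replace t [c] [Char.ofNat (c.toNat + 32)])
      = (fun t c => t.map (fun ch => if ch = c then Char.ofNat (c.toNat + 32) else ch)) := by
    funext t c
    exact replace_single t c _
  rw [hfn, stages _ _ (sorted_set_desc B.toList) hB, solve_loop_eq_map]
  simp only [List.nil_append]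
  apply List.map_congr_left
  intro ch _
  simp [PySem.List.mem_sorted, PySem.Set.mem_ofList]
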